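-- pv_equiv track=rewrite | github.com/franciscomatos/Message-Encryption-FP-P2 | projeto_final.py | e_chave
-- ===== SOURCE A (Python) =====
-- def e_chave(arg): #recebe um argumento e devolve True se este for do tipo chave e False caso contrario
--     conjunto_letras=('A','B','C','D','E','F','G','H','I','K','L','M','N','O','P','Q','R','S','T','U','V','W','X','Y','Z')
--     letras=()
--     if isinstance(arg,list) and len(arg)==5:
--         for linha in arg:
--             if isinstance(linha,list) and len(linha)==5:
--                 for elemento in linha:
--                     if isinstance(elemento,str) and elemento in conjunto_letras:
--                         if elemento not in letras:
--                             letras=letras+(elemento,)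
--                         else:
--                             return False
--                     else:
--                         return False
--             else:
--                 return False
--         return True
--     else:
--         return False
-- ===== SOURCE B (Python) =====
-- ALLOWED = set("ABCDEFGHIKLMNOPQRSTUVWXYZ")
--
-- def e_chave(arg):
--     # structure: a list of 5 lists of 5 cells
--     if not (isinstance(arg, list) and len(arg) == 5
--             and all(isinstance(r, list) and len(r) == 5 for r in arg)):
--         return False
--     # content: every cell is an allowed letter
--     if not all(isinstance(c, str) and c in ALLOWED for r in arg for c in r):
--         return False
--     # distinctness: 25 cells collapse to 25 distinct letters
--     return len({c for r in arg for c in r}) == 25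
-- ===== Notes on version B (the rewrite author's own statement) =====
-- stated objective: simpler
-- what changed: B replaces A's interleaved single loop with incremental tuple-based duplicate tracking by three separate passes: a structural check, a membership check against a constant set, and a duplicate check done at once via len(set(flattened cells)) == 25.
import Mathlib
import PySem

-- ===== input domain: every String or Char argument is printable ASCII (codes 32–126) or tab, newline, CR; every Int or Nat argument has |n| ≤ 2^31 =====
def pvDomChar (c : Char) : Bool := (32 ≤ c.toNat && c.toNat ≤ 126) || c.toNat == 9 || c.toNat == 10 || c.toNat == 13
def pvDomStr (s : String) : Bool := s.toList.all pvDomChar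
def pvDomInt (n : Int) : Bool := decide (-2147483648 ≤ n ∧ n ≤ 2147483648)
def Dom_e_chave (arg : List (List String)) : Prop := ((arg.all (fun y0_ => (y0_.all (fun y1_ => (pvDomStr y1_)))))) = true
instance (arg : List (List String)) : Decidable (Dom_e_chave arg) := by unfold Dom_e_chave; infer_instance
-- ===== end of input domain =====

-- B validates structure, membership and distinctness in three separate passes (set-size check)
-- instead of A's single interleaved loop with an incremental 'not in letras' tuple: simpler, same results.

-- ===== PORT A =====
def pvConj : List String :=
  ["A","B","C","D","E","F","G","H","I","K","L","M","N","O","P","Q","R","S","T","U","V","W","X","Y","Z"]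

def eChaveRow (linha : List String) (letras : List String) : Option (List String) :=
  match linha with
  | [] => some letras
  | e :: rest =>
    if pvConj.contains e then
      if ¬ letras.contains e then eChaveRow rest (letras ++ [e])
      else none
    else none

def eChaveRows (rows : List (List String)) (letras : List String) : Bool :=
  match rows with
  | [] => true
  | linha :: rest =>
    if linha.length == 5 then
      match eChaveRow linha letras with
      | some l => eChaveRows rest l
      | none => false
    else false

def e_chave (arg : List (List String)) : Bool :=
  if arg.length == 5 then eChaveRows arg [] else false

-- ===== PORT B =====
def pvAllowed : PySem.Set String :=
  PySem.Set.ofList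
    ["A","B","C","D","E","F","G","H","I","K","L","M","N","O","P","Q","R","S","T","U","V","W","X","Y","Z"]

def e_chave_alt (arg : List (List String)) : Bool :=
  if arg.length == 5 && arg.all (fun r => r.length == 5) then
    if arg.all (fun r => r.all (fun c => PySem.Set.contains pvAllowed c)) then
      PySem.Set.len (PySem.Set.ofList (arg.flatMap (fun r => r))) == 25
    else false
  else false

-- ===== PRECONDITION & SPEC =====
def Spec_e_chave (arg : List (List String)) (out : Bool) : Prop := out = e_chave_alt arg
instance (arg : List (List String)) (out : Bool) : Decidable (Spec_e_chave arg out) := by unfold Spec_e_chave; infer_instance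

-- ===== CLAIM (what is proved, stated in full; the proofs are below) =====
def Claim_equal_e_chave : Prop := ∀ (arg : List (List String)), Dom_e_chave arg → Spec_e_chave arg (e_chave arg)

-- ===== LEMMAS AND PROOFS =====

lemma row_spec (linha : List String) : ∀ (letras : List String),
    eChaveRow linha letras =
      if (∀ e ∈ linha, e ∈ pvConj) ∧ linha.Nodup ∧ (∀ e ∈ linha, e ∉ letras)
      then some (letras ++ linha) else none := by
  induction linha with
  | nil => intro letras; simp [eChaveRow]
  | cons e rest ih =>
    intro letras
    simp only [eChaveRow]
    by_cases hc : e ∈ pvConj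
    · by_cases hl : e ∈ letras
      · rw [if_pos (by simpa using hc), if_neg (by simpa using hl),
          if_neg (by rintro ⟨-, -, h3⟩; exact h3 e (by simp) hl)]
      · rw [if_pos (by simpa using hc), if_pos (by simpa using hl), ih (letras ++ [e])]
        by_cases hP : (∀ x ∈ rest, x ∈ pvConj) ∧ rest.Nodup ∧ ∀ x ∈ rest, x ∉ letras ++ [e]
        · obtain ⟨a1, a2, a3⟩ := hP
          have hnr : ∀ x ∈ rest, x ∉ letras ∧ x ≠ e := by
            intro x hx
            have := a3 x hx
            simpa using this
          rw [if_pos ⟨a1, a2, a3⟩, if_pos ?side]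
          · simp
          case side =>
            refine ⟨?_, ?_, ?_⟩
            · intro x hx
              rcases List.mem_cons.mp hx with rfl | hx
              · exact hc
              · exact a1 x hx
            · exact List.nodup_cons.mpr ⟨fun he => (hnr e he).2 rfl, a2⟩
            · intro x hx
              rcases List.mem_cons.mp hx with rfl | hx
              · exact hl
              · exact (hnr x hx).1
        · rw [if_neg hP, if_neg ?side2]
          case side2 =>
            rintro ⟨b1, b2, b3⟩
            apply hP
            refine ⟨fun x hx => b1 x (List.mem_cons_of_mem e hx),
              (List.nodup_cons.mp b2).2, ?_⟩
            intro x hx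
            simp only [List.mem_append, List.mem_singleton]
            rintro (hm | rfl)
            · exact b3 x (List.mem_cons_of_mem e hx) hm
            · exact (List.nodup_cons.mp b2).1 hx
    · rw [if_neg (by simpa using hc),
        if_neg (by rintro ⟨h1, -, -⟩; exact hc (h1 e (by simp)))]

lemma rows_spec (rows : List (List String)) : ∀ (letras : List String),
    eChaveRows rows letras =
      decide ((∀ r ∈ rows, r.length = 5) ∧
        (∀ e ∈ rows.flatMap (fun r => r), e ∈ pvConj) ∧
        (rows.flatMap (fun r => r)).Nodup ∧
        (∀ e ∈ rows.flatMap (fun r => r), e ∉ letras)) := by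
  induction rows with
  | nil => intro letras; simp [eChaveRows]
  | cons linha rest ih =>
    intro letras
    simp only [eChaveRows]
    by_cases h5 : linha.length = 5
    · rw [if_pos (by simpa using h5), row_spec]
      by_cases hP : (∀ e ∈ linha, e ∈ pvConj) ∧ linha.Nodup ∧ ∀ e ∈ linha, e ∉ letras
      · obtain ⟨a1, a2, a3⟩ := hP
        rw [if_pos ⟨a1, a2, a3⟩]
        show eChaveRows rest (letras ++ linha) = _
        rw [ih (letras ++ linha), decide_eq_decide, List.flatMap_cons]
        constructor
        · rintro ⟨b1, b2, b3, b4⟩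
          have b4' : ∀ x ∈ List.flatMap (fun r => r) rest, x ∉ letras ∧ x ∉ linha := by
            intro x hx
            have := b4 x hx
            simp only [List.mem_append] at this
            exact ⟨fun h => this (Or.inl h), fun h => this (Or.inr h)⟩
          refine ⟨?_, ?_, ?_, ?_⟩
          · intro r hr
            rcases List.mem_cons.mp hr with rfl | hr
            · exact h5
            · exact b1 r hr
          · intro x hx
            rcases List.mem_append.mp hx with hx | hx
            · exact a1 x hx
            · exact b2 x hx
          · rw [List.nodup_append]
            refine ⟨a2, b3, ?_⟩
            intro x hx y hy hxy
            exact (b4' y hy).2 (hxy ▸ hx)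
          · intro x hx
            rcases List.mem_append.mp hx with hx | hx
            · exact a3 x hx
            · exact (b4' x hx).1
        · rintro ⟨b1, b2, b3, b4⟩
          rw [List.nodup_append] at b3
          refine ⟨?_, ?_, b3.2.1, ?_⟩
          · intro r hr
            exact b1 r (List.mem_cons_of_mem _ hr)
          · intro x hx
            exact b2 x (List.mem_append.mpr (Or.inr hx))
          · intro x hx
            rw [List.mem_append]
            rintro (hm | hm)
            · exact b4 x (List.mem_append.mpr (Or.inr hx)) hm
            · exact b3.2.2 x hm x hx rfl
      · rw [if_neg hP]
        show false = _
        symm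
        rw [decide_eq_false_iff_not]
        rintro ⟨b1, b2, b3, b4⟩
        apply hP
        rw [List.flatMap_cons, List.nodup_append] at b3
        rw [List.flatMap_cons] at b2 b4
        exact ⟨fun x hx => b2 x (List.mem_append.mpr (Or.inl hx)), b3.1,
          fun x hx => b4 x (List.mem_append.mpr (Or.inl hx))⟩
    · rw [if_neg (by simpa using h5)]
      symm
      rw [decide_eq_false_iff_not]
      rintro ⟨b1, -⟩
      exact h5 (b1 linha List.mem_cons_self)

lemma foldl_add_length_le (xs : List String) : ∀ (s : List String),
    (xs.foldl PySem.Set.add s).length ≤ s.length + xs.length := by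
  induction xs with
  | nil => intro s; simp
  | cons x xs ih =>
    intro s
    simp only [List.foldl_cons]
    calc (xs.foldl PySem.Set.add (PySem.Set.add s x)).length
        ≤ (PySem.Set.add s x).length + xs.length := ih _
      _ ≤ s.length + (x :: xs).length := by
          simp only [PySem.Set.add]
          split_ifs
          · simp
          · simp only [List.length_append, List.length_cons, List.length_nil]
            omega

lemma foldl_add_length_iff (xs : List String) : ∀ (s : List String), s.Nodup →
    ((xs.foldl PySem.Set.add s).length = s.length + xs.length ↔ (s ++ xs).Nodup) := by
  induction xs with
  | nil => intro s hs; simpa using hs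
  | cons x xs ih =>
    intro s hs
    simp only [List.foldl_cons]
    by_cases hm : x ∈ s
    · have hadd : PySem.Set.add s x = s := PySem.Set.add_of_mem hm
      rw [hadd]
      constructor
      · intro h
        have := foldl_add_length_le xs s
        simp only [List.length_cons] at h
        omega
      · intro h
        exact absurd ((List.nodup_append.mp h).2.2 x hm x List.mem_cons_self rfl) not_false
    · have hadd : PySem.Set.add s x = s ++ [x] := PySem.Set.add_of_not_mem hm
      have hnd : (s ++ [x]).Nodup := by
        rw [List.nodup_append]
        refine ⟨hs, List.nodup_singleton x, ?_⟩
        intro a ha b hb hab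
        exact hm ((hab.trans (List.mem_singleton.mp hb)) ▸ ha)
      rw [hadd]
      have h2 := ih (s ++ [x]) hnd
      rw [List.append_assoc] at h2
      simp only [List.singleton_append] at h2
      have hln : s.length + (x :: xs).length = (s ++ [x]).length + xs.length := by
        simp only [List.length_append, List.length_cons, List.length_nil]
        omega
      rw [hln, h2]

lemma ofList_length_iff (xs : List String) :
    ((PySem.Set.ofList xs).length = xs.length ↔ xs.Nodup) := by
  rw [PySem.Set.ofList_eq_foldl]
  have h := foldl_add_length_iff xs [] List.nodup_nil
  simpa using h

lemma flat_length (rows : List (List String)) (h : ∀ r ∈ rows, r.length = 5) :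
    (rows.flatMap (fun r => r)).length = 5 * rows.length := by
  induction rows with
  | nil => simp
  | cons r rest ih =>
    simp only [List.flatMap_cons, List.length_append, List.length_cons]
    rw [h r List.mem_cons_self, ih (fun r hr => h r (List.mem_cons_of_mem _ hr))]
    ring

lemma allowed_contains (c : String) :
    (PySem.Set.contains pvAllowed c = true) ↔ c ∈ pvConj := by
  have h : pvAllowed = pvConj := by decide
  rw [h, PySem.Set.contains_eq_listContains]
  simp

-- ===== VERDICT (by name: the statement is the Claim_ definition above) =====
theorem e_chave_spec : Claim_equal_e_chave := by
  intro arg _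
  unfold Spec_e_chave e_chave e_chave_alt
  by_cases h5 : arg.length = 5
  case neg => rw [if_neg (by simpa using h5), if_neg (by simp [h5])]
  rw [if_pos (by simpa using h5), rows_spec]
  by_cases hall : ∀ r ∈ arg, r.length = 5
  case neg =>
    rw [decide_eq_false (by rintro ⟨h, -⟩; exact hall h), if_neg]
    simp only [Bool.and_eq_true, List.all_eq_true, not_and]
    intro _ h
    exact hall fun r hr => by simpa using h r hr
  have hb1 : (arg.length == 5 && arg.all fun r => r.length == 5) = true := by
    simp only [Bool.and_eq_true, beq_iff_eq, List.all_eq_true]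
    exact ⟨h5, hall⟩
  rw [if_pos hb1]
  by_cases hmem : ∀ e ∈ arg.flatMap (fun r => r), e ∈ pvConj
  case neg =>
    rw [not_forall] at hmem
    simp only [not_forall, exists_prop] at hmem
    obtain ⟨e, he, hne⟩ := hmem
    rw [decide_eq_false (by rintro ⟨-, h, -⟩; exact hne (h e he)), if_neg]
    simp only [List.all_eq_true, not_forall]
    obtain ⟨r, hr, hcr⟩ := List.mem_flatMap.mp he
    exact ⟨r, hr, e, hcr, fun h => hne ((allowed_contains e).mp h)⟩
  have hb2 : (arg.all fun r => r.all fun c => pvAllowed.contains c) = true := by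
    simp only [List.all_eq_true]
    intro r hr c hc
    exact (allowed_contains c).mpr (hmem c (List.mem_flatMap.mpr ⟨r, hr, hc⟩))
  rw [if_pos hb2]
  have hlen : (arg.flatMap (fun r => r)).length = 25 := by
    rw [flat_length arg hall, h5]
  by_cases hnd : (arg.flatMap (fun r => r)).Nodup
  · rw [decide_eq_true (show _ ∧ _ from ⟨hall, hmem, hnd, by simp⟩)]
    have hofl : (PySem.Set.ofList (arg.flatMap (fun r => r))).length = 25 := by
      rw [(ofList_length_iff _).mpr hnd, hlen]
    symm
    simp only [PySem.Set.len, hofl]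
    decide
  · rw [decide_eq_false (by rintro ⟨-, -, h, -⟩; exact hnd h)]
    symm
    simp only [PySem.Set.len, beq_eq_false_iff_ne, ne_eq]
    intro hlf
    apply hnd
    rw [← ofList_length_iff, hlen]
    exact_mod_cast hlf
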